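-- pv_equiv track=rewrite | github.com/HillelW/digital-philosophy | lindenmayer.py | enumerate_lexicographically
-- ===== SOURCE A (Python) =====
-- def enumerate_lexicographically (max_length=3, alphabet=None):
--     '''given an alphabet A, enumerates words from A* in lexicographic order.'''
--     print (alphabet)
--     reversed_alphabet = list(reversed(alphabet))
--     nodes_to_visit = ['']
--
--     while nodes_to_visit:
--         current_node = nodes_to_visit.pop ()
--
--         if len(current_node) > max_length:
--             continue
--
--         yield current_node
--         nodes_to_visit.extend (current_node + tc for tc in reversed_alphabet)
-- ===== SOURCE B (Python) =====
-- def enumerate_lexicographically (max_length=3, alphabet=None):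
--     '''given an alphabet A, enumerates words from A* in lexicographic order.'''
--     print (alphabet)
--     letters = list (alphabet)
--     if max_length < 0:
--         return
--     yield ''
--     chosen = []          # letter indices spelling the current word
--     length = 0           # its total length
--     while True:
--         # successor of the current word in prefix-tree preorder:
--         # deepen to the first letter that still fits, else backtrack and advance
--         j = 0
--         while True:
--             while j < len (letters) and length + len (letters[j]) > max_length:
--                 j += 1
--             if j < len (letters):
--                 break
--             if not chosen:
--                 return
--             j = chosen.pop ()
--             length -= len (letters[j])
--             j += 1
--         chosen.append (j)
--         length += len (letters[j])
--         yield ''.join (letters[i] for i in chosen)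
-- ===== Notes on version B (the rewrite author's own statement) =====
-- stated objective: alternative
-- what changed: Replaces the explicit DFS worklist of prefix strings (pop, skip-or-yield, push children built with the reversed alphabet) by an iterative successor ('odometer') loop that keeps only the index stack of the current word and repeatedly computes the next word in prefix-tree preorder by deepening to the first letter that still fits, else backtracking and advancing; Pre_ only excludes inputs (an empty-string letter with max_length >= 0) on which A diverges, so no input A returns on is excluded.
import Mathlib
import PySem

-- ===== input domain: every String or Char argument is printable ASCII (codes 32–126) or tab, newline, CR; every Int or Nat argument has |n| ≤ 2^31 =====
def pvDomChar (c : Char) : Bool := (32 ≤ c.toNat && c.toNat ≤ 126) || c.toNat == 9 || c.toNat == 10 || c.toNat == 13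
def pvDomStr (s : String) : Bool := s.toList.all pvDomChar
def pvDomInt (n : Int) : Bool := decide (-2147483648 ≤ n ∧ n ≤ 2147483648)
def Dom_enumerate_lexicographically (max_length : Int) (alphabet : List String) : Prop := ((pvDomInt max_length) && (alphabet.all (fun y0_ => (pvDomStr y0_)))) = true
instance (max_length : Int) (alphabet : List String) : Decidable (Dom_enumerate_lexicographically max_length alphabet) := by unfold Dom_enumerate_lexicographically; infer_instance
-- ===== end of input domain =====

-- B replaces the DFS worklist of prefix strings by an iterative successor ("odometer")
-- loop over the index stack of the current word (alternative decomposition, same cost);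
-- equivalence is about the yielded values (the 'print' side effect is ignored).

-- ===== PORT A =====
-- A's while-loop over the worklist, step for step.  The Python list pops from its END and
-- extends with the REVERSED alphabet; we keep the stack with its top at the HEAD, so the
-- 'extend(reversed alphabet)' + later pops become prepending the children in forward
-- alphabet order.  Strings are handled as List Char (PySem convention).  The Nat fuel is a
-- totality guard only: it counts loop iterations and is proved never to run out on Pre_.
def pvLoopA (ml : Int) (alph : List (List Char)) : Nat → List (List Char) → List (List Char)
  | 0, _ => []
  | _ + 1, [] => []
  | f + 1, n :: rest =>
    if (n.length : Int) > ml then pvLoopA ml alph f rest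
    else n :: pvLoopA ml alph f ((alph.map (fun tc => n ++ tc)) ++ rest)

def enumerate_lexicographically (max_length : Int) (alphabet : List String) : List String :=
  let alph := alphabet.map String.toList
  (pvLoopA max_length alph ((alph.length + 1) ^ (max_length + 2).toNat) [[]]).map
    (fun l => String.ofList l)

-- ===== PORT B =====
-- B's ''.join(letters[i] for i in chosen).  Python appends/pops chosen at its END; the
-- port keeps the stack with its top at the HEAD, hence the reverse before joining.
def pvWordB (letters : List (List Char)) (chosen : List Nat) : List Char :=
  (chosen.reverse.map (fun i => letters.getD i [])).flatten

-- B's inner 'while j < len(letters) and length + len(letters[j]) > max_length: j += 1'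
-- followed by the 'if j < len(letters)' test: the first fitting letter index ≥ j, if any.
def pvScanB (ml : Int) (letters : List (List Char)) (length : Int) (j : Nat) : Option Nat :=
  if h : j < letters.length then
    if length + (letters[j].length : Int) > ml then pvScanB ml letters length (j + 1)
    else some j
  else none
termination_by letters.length - j
decreasing_by omega

-- B's middle 'while True' (break on a fitting letter / return on an empty stack /
-- pop-and-advance otherwise) together with the append after the break: the successor
-- state, or none when the enumeration is finished.  Structural recursion on chosen.
def pvStepB (ml : Int) (letters : List (List Char)) (chosen : List Nat) (length : Int)
    (j : Nat) : Option (List Nat × Int) :=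
  match pvScanB ml letters length j with
  | some j' => some (j' :: chosen, length + ((letters.getD j' []).length : Int))
  | none =>
    match chosen with
    | [] => none
    | i :: rest => pvStepB ml letters rest (length - ((letters.getD i []).length : Int)) (i + 1)

-- B's outer 'while True', one yield per iteration.  The Nat fuel is a totality guard
-- only (it counts yields) and is proved never to run out on Pre_.
def pvLoopB (ml : Int) (letters : List (List Char)) : Nat → List Nat → Int → List (List Char)
  | 0, _, _ => []
  | f + 1, chosen, length =>
    match pvStepB ml letters chosen length 0 with
    | none => []
    | some (chosen', length') =>
      pvWordB letters chosen' :: pvLoopB ml letters f chosen' length'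

def enumerate_lexicographically_alt (max_length : Int) (alphabet : List String) : List String :=
  let letters := alphabet.map String.toList
  if max_length < 0 then []
  else
    "" :: (pvLoopB max_length letters ((letters.length + 1) ^ (max_length + 2).toNat)
      [] 0).map (fun l => String.ofList l)

-- ===== PRECONDITION & SPEC =====
-- Pre_ excludes exactly the inputs on which Python A DIVERGES: an empty-string letter in
-- the alphabet with max_length ≥ 0 keeps re-pushing nodes of unchanged length, so A never
-- finishes.  A returns on every input Pre_ admits; no returning input is excluded.
def Pre_enumerate_lexicographically (max_length : Int) (alphabet : List String) : Prop :=
  "" ∈ alphabet → max_length < 0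
instance (max_length : Int) (alphabet : List String) : Decidable (Pre_enumerate_lexicographically max_length alphabet) := by unfold Pre_enumerate_lexicographically; infer_instance

def pvWitness_enumerate_lexicographically : Int × List String := (2, ["a", "b"])

def Spec_enumerate_lexicographically (max_length : Int) (alphabet : List String) (out : List String) : Prop := out = enumerate_lexicographically_alt max_length alphabet
instance (max_length : Int) (alphabet : List String) (out : List String) : Decidable (Spec_enumerate_lexicographically max_length alphabet out) := by unfold Spec_enumerate_lexicographically; infer_instance

-- ===== CLAIM (what is proved, stated in full; the proofs are below) =====
def Claim_equal_enumerate_lexicographically : Prop := ∀ (max_length : Int) (alphabet : List String), Dom_enumerate_lexicographically max_length alphabet → Pre_enumerate_lexicographically max_length alphabet → Spec_enumerate_lexicographically max_length alphabet (enumerate_lexicographically max_length alphabet)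

-- ===== LEMMAS AND PROOFS =====

-- canonical suffix lists, fueled: pvS alph f r = all words of length ≤ r in preorder
def pvS (alph : List (List Char)) : Nat → Nat → List (List Char)
  | 0, _ => []
  | f + 1, r =>
    [] :: alph.flatMap (fun c =>
      if c.length ≤ r then (pvS alph f (r - c.length)).map (fun w => c ++ w) else [])

theorem pvS_fuel_irrel (alph : List (List Char)) (halph : ∀ l ∈ alph, l ≠ []) :
    ∀ (f g r : Nat), r < f → r < g → pvS alph f r = pvS alph g r := by
  intro f
  induction f with
  | zero => intro g r hf _; omega
  | succ f' ih =>
    intro g r hf hg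
    cases g with
    | zero => omega
    | succ g' =>
      simp only [pvS]
      congr 1
      apply List.flatMap_congr
      intro c hc
      by_cases hcr : c.length ≤ r
      · have hc1 : 1 ≤ c.length := by
          have := halph c hc
          cases c with
          | nil => exact absurd rfl this
          | cons a t => simp
        rw [if_pos hcr, if_pos hcr, ih g' (r - c.length) (by omega) (by omega)]
      · rw [if_neg hcr, if_neg hcr]

-- the canonical suffix list for budget r
def pvSc (alph : List (List Char)) (r : Nat) : List (List Char) := pvS alph (r + 1) r

theorem pvSc_unfold (alph : List (List Char)) (halph : ∀ l ∈ alph, l ≠ []) (r : Nat) :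
    pvSc alph r = [] :: alph.flatMap (fun c =>
      if c.length ≤ r then (pvSc alph (r - c.length)).map (fun w => c ++ w) else []) := by
  unfold pvSc
  conv_lhs => rw [pvS]
  congr 1
  apply List.flatMap_congr
  intro c hc
  by_cases hcr : c.length ≤ r
  · have hc1 : 1 ≤ c.length := by
      have := halph c hc
      cases c with
      | nil => exact absurd rfl this
      | cons a t => simp
    rw [if_pos hcr, if_pos hcr,
      pvS_fuel_irrel alph halph r (r - c.length + 1) (r - c.length) (by omega) (by omega)]
  · rw [if_neg hcr, if_neg hcr]

-- output size bound (fuel estimate for both loops)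
theorem pvS_len_le (alph : List (List Char)) :
    ∀ (f r : Nat), (pvS alph f r).length ≤ (alph.length + 1) ^ f := by
  intro f
  induction f with
  | zero => intro r; simp [pvS]
  | succ f' ih =>
    intro r
    simp only [pvS, List.length_cons, List.length_flatMap]
    have hsum : ((alph.map (fun c => (if c.length ≤ r
          then (pvS alph f' (r - c.length)).map (fun w => c ++ w) else []).length)).sum)
        ≤ alph.length * (alph.length + 1) ^ f' := by
      calc (alph.map (fun c => (if c.length ≤ r
            then (pvS alph f' (r - c.length)).map (fun w => c ++ w) else []).length)).sum
          ≤ (alph.map (fun c => (if c.length ≤ r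
              then (pvS alph f' (r - c.length)).map (fun w => c ++ w) else []).length)).length
            • ((alph.length + 1) ^ f') := by
            apply List.sum_le_card_nsmul
            intro x hx
            obtain ⟨c, _, rfl⟩ := List.mem_map.mp hx
            by_cases hcr : c.length ≤ r
            · simpa [hcr] using ih (r - c.length)
            · simp [hcr]
        _ = alph.length * (alph.length + 1) ^ f' := by
            simp [List.length_map, smul_eq_mul]
    have hpow : 1 ≤ (alph.length + 1) ^ f' := Nat.one_le_pow _ _ (by omega)
    calc (alph.map (fun c => (if c.length ≤ r
          then (pvS alph f' (r - c.length)).map (fun w => c ++ w) else []).length)).sum + 1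
        ≤ alph.length * (alph.length + 1) ^ f' + (alph.length + 1) ^ f' := by omega
      _ = (alph.length + 1) ^ (f' + 1) := by ring

-- the preorder subtree contributed by one worklist node
def pvSub (ml : Int) (alph : List (List Char)) (n : List Char) : List (List Char) :=
  if (n.length : Int) > ml then []
  else (pvSc alph (ml - n.length).toNat).map (fun w => n ++ w)

theorem pvSub_unfold (ml : Int) (alph : List (List Char)) (halph : ∀ l ∈ alph, l ≠ [])
    (n : List Char) (h : ¬ (n.length : Int) > ml) :
    pvSub ml alph n = n :: alph.flatMap (fun c => pvSub ml alph (n ++ c)) := by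
  unfold pvSub
  rw [if_neg h, pvSc_unfold alph halph]
  simp only [List.map_cons, List.append_nil, List.map_flatMap]
  congr 1
  apply List.flatMap_congr
  intro c hc
  by_cases hcr : c.length ≤ (ml - (n.length : Int)).toNat
  · have hlen : ¬ ((n ++ c).length : Int) > ml := by
      simp only [List.length_append]; push_cast; omega
    rw [if_pos hcr, if_neg hlen, List.map_map]
    have harg : ((ml - (n.length : Int)).toNat - c.length)
        = (ml - ((n ++ c).length : Int)).toNat := by
      simp only [List.length_append]; omega
    rw [harg]
    apply List.map_congr_left
    intro w _
    simp [List.append_assoc]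
  · have hlen : ((n ++ c).length : Int) > ml := by
      simp only [List.length_append]; push_cast; omega
    rw [if_neg hcr, if_pos hlen, List.map_nil]

-- sum of an affine map over a list
theorem pv_sum_affine (L : Nat) (g : List Char → Nat) :
    ∀ l : List (List Char), (l.map (fun c => 1 + L * g c)).sum
      = l.length + L * (l.map g).sum := by
  intro l
  induction l with
  | nil => simp
  | cons a t iht => simp only [List.map_cons, List.sum_cons, List.length_cons, iht]; ring

-- fuel needed by a stack
def pvNeeded (ml : Int) (alph : List (List Char)) (stack : List (List Char)) : Nat :=
  (stack.map (fun n => 1 + alph.length * (pvSub ml alph n).length)).sum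

-- main A-side lemma: with enough fuel, the worklist loop lists each entry's subtree
theorem pvLoopA_eq (ml : Int) (alph : List (List Char)) (halph : ∀ l ∈ alph, l ≠ []) :
    ∀ (f : Nat) (stack : List (List Char)), pvNeeded ml alph stack ≤ f →
      pvLoopA ml alph f stack = stack.flatMap (pvSub ml alph) := by
  intro f
  induction f with
  | zero =>
    intro stack h
    cases stack with
    | nil => rfl
    | cons n rest => simp [pvNeeded] at h
  | succ f' ih =>
    intro stack h
    cases stack with
    | nil => rfl
    | cons n rest =>
      by_cases hlen : (n.length : Int) > ml
      · have hT : pvSub ml alph n = [] := by unfold pvSub; rw [if_pos hlen]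
        have hneed : pvNeeded ml alph rest ≤ f' := by
          simp only [pvNeeded, List.map_cons, List.sum_cons, hT, List.length_nil] at h ⊢
          omega
        simp only [pvLoopA, if_pos hlen, List.flatMap_cons, hT, List.nil_append]
        exact ih rest hneed
      · have hT := pvSub_unfold ml alph halph n hlen
        have hlenT : (pvSub ml alph n).length
            = 1 + (alph.map (fun c => (pvSub ml alph (n ++ c)).length)).sum := by
          rw [hT]; simp [List.length_flatMap, Nat.add_comm]
        have hneed : pvNeeded ml alph ((alph.map (fun tc => n ++ tc)) ++ rest) ≤ f' := by
          simp only [pvNeeded, List.map_cons, List.sum_cons, List.map_append,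
            List.sum_append, List.map_map] at h ⊢
          have hmap : (List.map ((fun n' => 1 + alph.length * (pvSub ml alph n').length)
                ∘ fun tc => n ++ tc) alph).sum
              = (alph.map (fun c =>
                  1 + alph.length * (pvSub ml alph (n ++ c)).length)).sum := rfl
          have hsum2 := pv_sum_affine alph.length
            (fun c => (pvSub ml alph (n ++ c)).length) alph
          rw [hmap, hsum2]
          rw [hlenT] at h
          have hexp : alph.length
                * (1 + (alph.map fun c => (pvSub ml alph (n ++ c)).length).sum)
              = alph.length
                + alph.length * (alph.map fun c => (pvSub ml alph (n ++ c)).length).sum := by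
            ring
          omega
        simp only [pvLoopA, if_neg hlen]
        rw [ih _ hneed, List.flatMap_append, List.flatMap_map, List.flatMap_cons, hT]
        simp

-- ===== B-side characterisation =====

theorem pvWordB_cons (letters : List (List Char)) (i : Nat) (rest : List Nat) :
    pvWordB letters (i :: rest) = pvWordB letters rest ++ letters.getD i [] := by
  simp [pvWordB, List.reverse_cons]

-- what is still to be yielded after the current word, when the search for the next
-- letter at the top level stands at index j: the pending sibling subtrees level by level
def pvSib (ml : Int) (letters : List (List Char)) : List Nat → List (List Char)
  | [] => []
  | i :: rest =>
    (letters.drop (i + 1)).flatMap (fun c => pvSub ml letters (pvWordB letters rest ++ c))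
      ++ pvSib ml letters rest

def pvR (ml : Int) (letters : List (List Char)) (chosen : List Nat) (j : Nat) :
    List (List Char) :=
  (letters.drop j).flatMap (fun c => pvSub ml letters (pvWordB letters chosen ++ c))
    ++ pvSib ml letters chosen

-- scan characterisation, failure case: every candidate child from j on is pruned
theorem pvScanB_none_char (ml : Int) (letters : List (List Char)) (p : List Char) :
    ∀ (k j : Nat), letters.length ≤ j + k →
      pvScanB ml letters (p.length : Int) j = none →
      (letters.drop j).flatMap (fun c => pvSub ml letters (p ++ c)) = [] := by
  intro k
  induction k with
  | zero =>
    intro j hj _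
    rw [List.drop_eq_nil_of_le (by omega)]
    rfl
  | succ k' ih =>
    intro j hj hscan
    by_cases h : j < letters.length
    · rw [pvScanB, dif_pos h] at hscan
      by_cases hcond : (p.length : Int) + (letters[j].length : Int) > ml
      · rw [if_pos hcond] at hscan
        have hdrop : letters.drop j = letters[j] :: letters.drop (j + 1) :=
          List.drop_eq_getElem_cons h
        have hsub : pvSub ml letters (p ++ letters[j]) = [] := by
          unfold pvSub
          rw [if_pos (by simp only [List.length_append]; push_cast; omega)]
        rw [hdrop, List.flatMap_cons, hsub, List.nil_append]
        exact ih (j + 1) (by omega) hscan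
      · rw [if_neg hcond] at hscan
        exact absurd hscan (by simp)
    · rw [List.drop_eq_nil_of_le (by omega)]
      rfl

-- scan characterisation, success case: j' is the first fitting child index ≥ j
theorem pvScanB_some_char (ml : Int) (letters : List (List Char)) (p : List Char) :
    ∀ (k j j' : Nat), letters.length ≤ j + k →
      pvScanB ml letters (p.length : Int) j = some j' →
      j' < letters.length ∧
      ¬ ((p.length : Int) + ((letters.getD j' []).length : Int) > ml) ∧
      (letters.drop j).flatMap (fun c => pvSub ml letters (p ++ c))
        = pvSub ml letters (p ++ letters.getD j' [])
          ++ (letters.drop (j' + 1)).flatMap (fun c => pvSub ml letters (p ++ c)) := by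
  intro k
  induction k with
  | zero =>
    intro j j' hj hscan
    rw [pvScanB, dif_neg (by omega)] at hscan
    exact absurd hscan (by simp)
  | succ k' ih =>
    intro j j' hj hscan
    by_cases h : j < letters.length
    · rw [pvScanB, dif_pos h] at hscan
      by_cases hcond : (p.length : Int) + (letters[j].length : Int) > ml
      · rw [if_pos hcond] at hscan
        obtain ⟨h1, h2, h3⟩ := ih (j + 1) j' (by omega) hscan
        refine ⟨h1, h2, ?_⟩
        have hdrop : letters.drop j = letters[j] :: letters.drop (j + 1) :=
          List.drop_eq_getElem_cons h
        have hsub : pvSub ml letters (p ++ letters[j]) = [] := by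
          unfold pvSub
          rw [if_pos (by simp only [List.length_append]; push_cast; omega)]
        rw [hdrop, List.flatMap_cons, hsub, List.nil_append, h3]
      · rw [if_neg hcond] at hscan
        have hjj : j' = j := by simpa using hscan.symm
        subst hjj
        have hget : letters.getD j' [] = letters[j'] := by
          rw [List.getD_eq_getElem?_getD, List.getElem?_eq_getElem h]
          rfl
        refine ⟨h, by rw [hget]; exact hcond, ?_⟩
        have hdrop : letters.drop j' = letters[j'] :: letters.drop (j' + 1) :=
          List.drop_eq_getElem_cons h
        rw [hdrop, List.flatMap_cons, hget]
    · rw [pvScanB, dif_neg h] at hscan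
      exact absurd hscan (by simp)

-- successor characterisation: pvStepB finds the next yielded word of the stream pvR
theorem pvStepB_char (ml : Int) (letters : List (List Char))
    (halph : ∀ l ∈ letters, l ≠ []) :
    ∀ (chosen : List Nat) (j : Nat),
      (pvStepB ml letters chosen ((pvWordB letters chosen).length : Int) j = none →
        pvR ml letters chosen j = []) ∧
      (∀ (ch' : List Nat) (l' : Int),
        pvStepB ml letters chosen ((pvWordB letters chosen).length : Int) j
          = some (ch', l') →
        l' = ((pvWordB letters ch').length : Int) ∧
        pvR ml letters chosen j = pvWordB letters ch' :: pvR ml letters ch' 0) := by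
  intro chosen
  induction chosen with
  | nil =>
    intro j
    constructor
    · intro hstep
      unfold pvStepB at hstep
      cases hscan : pvScanB ml letters ((pvWordB letters []).length : Int) j with
      | some j' => rw [hscan] at hstep; exact absurd hstep (by simp)
      | none =>
        have hnil := pvScanB_none_char ml letters (pvWordB letters [])
          letters.length j (by omega) hscan
        unfold pvR pvSib
        rw [hnil, List.append_nil]
    · intro ch' l' hstep
      unfold pvStepB at hstep
      cases hscan : pvScanB ml letters ((pvWordB letters []).length : Int) j with
      | none => rw [hscan] at hstep; exact absurd hstep (by simp)
      | some j' =>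
        rw [hscan] at hstep
        obtain ⟨hch, hl⟩ : (j' :: [] = ch')
            ∧ ((pvWordB letters []).length : Int)
              + ((letters.getD j' []).length : Int) = l' := by
          constructor <;> (cases hstep; rfl)
        obtain ⟨h1, h2, h3⟩ := pvScanB_some_char ml letters (pvWordB letters [])
          letters.length j j' (by omega) hscan
        subst hch
        have hword : pvWordB letters [j'] = pvWordB letters [] ++ letters.getD j' [] :=
          pvWordB_cons letters j' []
        constructor
        · rw [← hl, hword]
          push_cast [List.length_append]
          ring
        · unfold pvR pvSib
          rw [h3, ← hword]
          have hfit : ¬ ((pvWordB letters [j']).length : Int) > ml := by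
            rw [hword]
            push_cast [List.length_append]
            omega
          rw [pvSub_unfold ml letters halph _ hfit]
          simp [pvSib]
  | cons i rest ih =>
    intro j
    have hlen : ((pvWordB letters (i :: rest)).length : Int)
        - ((letters.getD i []).length : Int) = ((pvWordB letters rest).length : Int) := by
      rw [pvWordB_cons]
      push_cast [List.length_append]
      ring
    constructor
    · intro hstep
      unfold pvStepB at hstep
      cases hscan : pvScanB ml letters ((pvWordB letters (i :: rest)).length : Int) j with
      | some j' => rw [hscan] at hstep; exact absurd hstep (by simp)
      | none =>
        rw [hscan] at hstep
        have hstep2 : pvStepB ml letters rest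
            (((pvWordB letters (i :: rest)).length : Int)
              - ((letters.getD i []).length : Int)) (i + 1) = none := hstep
        rw [hlen] at hstep2
        have hnil := pvScanB_none_char ml letters (pvWordB letters (i :: rest))
          letters.length j (by omega) hscan
        have hrest := (ih (i + 1)).1 hstep2
        unfold pvR at hrest ⊢
        unfold pvSib
        rw [hnil, List.nil_append]
        exact hrest
    · intro ch' l' hstep
      unfold pvStepB at hstep
      cases hscan : pvScanB ml letters ((pvWordB letters (i :: rest)).length : Int) j with
      | none =>
        rw [hscan] at hstep
        have hstep2 : pvStepB ml letters rest
            (((pvWordB letters (i :: rest)).length : Int)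
              - ((letters.getD i []).length : Int)) (i + 1) = some (ch', l') := hstep
        rw [hlen] at hstep2
        have hnil := pvScanB_none_char ml letters (pvWordB letters (i :: rest))
          letters.length j (by omega) hscan
        have hrest := (ih (i + 1)).2 ch' l' hstep2
        refine ⟨hrest.1, ?_⟩
        have hsib : pvSib ml letters (i :: rest)
            = (letters.drop (i + 1)).flatMap
                (fun c => pvSub ml letters (pvWordB letters rest ++ c))
              ++ pvSib ml letters rest := rfl
        unfold pvR at hrest ⊢
        rw [hsib, hnil, List.nil_append]
        exact hrest.2
      | some j' =>
        rw [hscan] at hstep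
        obtain ⟨hch, hl⟩ : (j' :: i :: rest = ch')
            ∧ ((pvWordB letters (i :: rest)).length : Int)
              + ((letters.getD j' []).length : Int) = l' := by
          constructor <;> (cases hstep; rfl)
        obtain ⟨h1, h2, h3⟩ := pvScanB_some_char ml letters (pvWordB letters (i :: rest))
          letters.length j j' (by omega) hscan
        subst hch
        have hword : pvWordB letters (j' :: i :: rest)
            = pvWordB letters (i :: rest) ++ letters.getD j' [] :=
          pvWordB_cons letters j' (i :: rest)
        constructor
        · rw [← hl, hword]
          push_cast [List.length_append]
          ring
        · unfold pvR
          conv_lhs => rw [h3, ← hword]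
          have hfit : ¬ ((pvWordB letters (j' :: i :: rest)).length : Int) > ml := by
            rw [hword]
            push_cast [List.length_append]
            omega
          rw [pvSub_unfold ml letters halph _ hfit]
          have hsib : pvSib ml letters (j' :: i :: rest)
              = (letters.drop (j' + 1)).flatMap
                  (fun c => pvSub ml letters (pvWordB letters (i :: rest) ++ c))
                ++ pvSib ml letters (i :: rest) := rfl
          rw [hsib, List.drop_zero]
          simp [List.append_assoc]

-- the outer loop yields exactly the remaining stream pvR, given enough fuel
theorem pvLoopB_eq (ml : Int) (letters : List (List Char))
    (halph : ∀ l ∈ letters, l ≠ []) :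
    ∀ (f : Nat) (chosen : List Nat), (pvR ml letters chosen 0).length ≤ f →
      pvLoopB ml letters f chosen ((pvWordB letters chosen).length : Int)
        = pvR ml letters chosen 0 := by
  intro f
  induction f with
  | zero =>
    intro chosen h
    have : pvR ml letters chosen 0 = [] := List.eq_nil_of_length_eq_zero (by omega)
    rw [this]
    rfl
  | succ f' ih =>
    intro chosen h
    simp only [pvLoopB]
    cases hstep : pvStepB ml letters chosen ((pvWordB letters chosen).length : Int) 0 with
    | none =>
      rw [(pvStepB_char ml letters halph chosen 0).1 hstep]
    | some x =>
      obtain ⟨ch', l'⟩ := x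
      obtain ⟨hl, hR⟩ := (pvStepB_char ml letters halph chosen 0).2 ch' l' hstep
      rw [hR]
      subst hl
      have hrec := ih ch' (by rw [hR] at h; simp at h; omega)
      exact congrArg (fun t => pvWordB letters ch' :: t) hrec

-- A's worklist result is the whole preorder subtree of the root
theorem pvA_root (ml : Int) (alph : List (List Char)) (hml : 0 ≤ ml)
    (halph : ∀ l ∈ alph, l ≠ []) :
    pvLoopA ml alph ((alph.length + 1) ^ (ml + 2).toNat) [[]] = pvSub ml alph [] := by
  have hbud : (ml - ((List.length ([] : List Char)) : Int)).toNat = ml.toNat := by simp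
  have hsz : (pvSub ml alph []).length ≤ (alph.length + 1) ^ (ml.toNat + 1) := by
    unfold pvSub
    rw [if_neg (by simp; omega), hbud]
    calc ((pvSc alph ml.toNat).map (fun w => [] ++ w)).length
        = (pvSc alph ml.toNat).length := by simp
      _ ≤ (alph.length + 1) ^ (ml.toNat + 1) := pvS_len_le alph _ _
  have hneed : pvNeeded ml alph [[]] ≤ (alph.length + 1) ^ (ml + 2).toNat := by
    simp only [pvNeeded, List.map_cons, List.map_nil, List.sum_cons, List.sum_nil]
    have he : (ml + 2).toNat = (ml.toNat + 1) + 1 := by omega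
    rw [he]
    have hpow : 1 ≤ (alph.length + 1) ^ (ml.toNat + 1) := Nat.one_le_pow _ _ (by omega)
    calc 1 + alph.length * (pvSub ml alph []).length + 0
        ≤ 1 + alph.length * ((alph.length + 1) ^ (ml.toNat + 1)) := by
          have := Nat.mul_le_mul_left alph.length hsz
          omega
      _ ≤ (alph.length + 1) ^ (ml.toNat + 1)
          + alph.length * (alph.length + 1) ^ (ml.toNat + 1) := by omega
      _ = (alph.length + 1) ^ ((ml.toNat + 1) + 1) := by ring
  rw [pvLoopA_eq ml alph halph _ _ hneed]
  simp [List.flatMap_cons]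

-- the root subtree is the root word followed by the odometer's stream from the start
theorem pvSub_nil_eq (ml : Int) (letters : List (List Char)) (hml : 0 ≤ ml)
    (halph : ∀ l ∈ letters, l ≠ []) :
    pvSub ml letters [] = [] :: pvR ml letters [] 0 := by
  rw [pvSub_unfold ml letters halph [] (by simp; omega)]
  unfold pvR pvSib
  simp [pvWordB]

-- ===== VERDICT (by name: the statement is the Claim_ definition above) =====
theorem enumerate_lexicographically_spec : Claim_equal_enumerate_lexicographically := by
  intro max_length alphabet _ hpre
  unfold Spec_enumerate_lexicographically
  unfold enumerate_lexicographically enumerate_lexicographically_alt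
  simp only []
  by_cases hml : max_length < 0
  · rw [if_pos hml]
    have hfuel : 1 ≤ (List.length (alphabet.map String.toList) + 1)
        ^ (max_length + 2).toNat := Nat.one_le_pow _ _ (by omega)
    obtain ⟨f, hf⟩ : ∃ f, (List.length (alphabet.map String.toList) + 1)
        ^ (max_length + 2).toNat = f + 1 :=
      ⟨(List.length (alphabet.map String.toList) + 1) ^ (max_length + 2).toNat - 1,
        by omega⟩
    rw [hf]
    have hskip : ((List.length ([] : List Char)) : Int) > max_length := by simp; omega
    simp only [pvLoopA, if_pos hskip]
    cases f <;> rfl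
  · rw [if_neg hml]
    by_cases hemp : (alphabet.map String.toList).isEmpty
    · have halph : alphabet.map String.toList = [] := List.isEmpty_iff.mp hemp
      rw [halph]
      have h1 : pvLoopA max_length [] 1 [[]] = [[]] := by
        simp [pvLoopA]; omega
      have h2 : pvLoopB max_length [] 1 [] 0 = [] := by
        simp [pvLoopB, pvStepB, pvScanB]
      simp only [List.length_nil, Nat.zero_add, one_pow, h1, h2]
      rfl
    · have halph : ∀ l ∈ alphabet.map String.toList, l ≠ [] := by
        intro l hl hnil
        subst hnil
        obtain ⟨s, hs, hnil⟩ := List.mem_map.mp hl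
        have hs' : s = "" := by
          rw [← String.toList_inj]; simpa using hnil
        exact absurd (hpre (hs' ▸ hs)) (by omega)
      have hml' : (0 : Int) ≤ max_length := by omega
      rw [pvA_root max_length (alphabet.map String.toList) hml' halph,
        pvSub_nil_eq max_length (alphabet.map String.toList) hml' halph]
      have hword0 : ((pvWordB (alphabet.map String.toList) []).length : Int) = 0 := by
        simp [pvWordB]
      have hlenR : (pvR max_length (alphabet.map String.toList) [] 0).length
          ≤ (List.length (alphabet.map String.toList) + 1)
            ^ (max_length + 2).toNat := by
      -- |pvR [] 0| + 1 = |pvSub []| ≤ (n+1)^(ml.toNat+1) ≤ (n+1)^(ml+2).toNat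
        have h1 : (pvSub max_length (alphabet.map String.toList) []).length
            = (pvR max_length (alphabet.map String.toList) [] 0).length + 1 := by
          rw [pvSub_nil_eq max_length (alphabet.map String.toList) hml' halph]
          simp
        have h2 : (pvSub max_length (alphabet.map String.toList) []).length
            ≤ (List.length (alphabet.map String.toList) + 1)
              ^ (max_length.toNat + 1) := by
          unfold pvSub
          rw [if_neg (by simp; omega)]
          calc ((pvSc (alphabet.map String.toList)
                (max_length - ((List.length ([] : List Char)) : Int)).toNat).map
                  (fun w => [] ++ w)).length
              = (pvSc (alphabet.map String.toList)
                  (max_length - ((List.length ([] : List Char)) : Int)).toNat).length := by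
                simp
            _ ≤ _ := by
                have := pvS_len_le (alphabet.map String.toList)
                  ((max_length - ((List.length ([] : List Char)) : Int)).toNat + 1)
                  (max_length - ((List.length ([] : List Char)) : Int)).toNat
                simpa [pvSc] using this
        have h3 : (List.length (alphabet.map String.toList) + 1) ^ (max_length.toNat + 1)
            ≤ (List.length (alphabet.map String.toList) + 1)
              ^ (max_length + 2).toNat := by
          apply Nat.pow_le_pow_right (by omega)
          omega
        omega
      have hB := pvLoopB_eq max_length (alphabet.map String.toList) halph
        ((List.length (alphabet.map String.toList) + 1) ^ (max_length + 2).toNat)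
        [] hlenR
      rw [hword0] at hB
      rw [hB]
      rfl
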